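-- pv_equiv track=rewrite | github.com/ammarlodhi255/python-src | get_concatenated_input.py | get_count_sum
-- ===== SOURCE A (Python) =====
-- def get_count_sum(num):
--     sum = 0
--     for i in range(1, num+1):
--         num = 0
--         for j in range(0, i):
--             num += (3 * 10**j)
--         sum += num
--     return sum
-- ===== SOURCE B (Python) =====
-- def get_count_sum(num):
--     # closed form: sum_{i=1..num} (10**i - 1)//3  =  ((10**(num+1) - 10)//9 - num)//3
--     n = num if num > 0 else 0
--     return ((pow(10, n + 1) - 10) // 9 - n) // 3
-- ===== Notes on version B (the rewrite author's own statement) =====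
-- stated objective: faster
-- what changed: Replaced the O(n^2) nested accumulation of concatenated-3 numbers by the geometric-series closed form ((10^(n+1)-10)//9 - n)//3 computed with one pow.
import Mathlib
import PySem

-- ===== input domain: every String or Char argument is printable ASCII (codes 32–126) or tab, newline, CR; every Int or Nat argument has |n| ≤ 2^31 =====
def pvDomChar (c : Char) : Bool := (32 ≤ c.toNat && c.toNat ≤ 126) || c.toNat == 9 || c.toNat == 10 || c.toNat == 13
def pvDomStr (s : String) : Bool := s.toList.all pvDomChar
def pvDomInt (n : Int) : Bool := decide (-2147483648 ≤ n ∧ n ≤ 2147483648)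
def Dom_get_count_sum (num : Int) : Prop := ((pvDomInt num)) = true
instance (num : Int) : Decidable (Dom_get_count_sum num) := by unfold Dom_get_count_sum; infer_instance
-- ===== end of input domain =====

-- B replaces A's O(n^2) nested loops by the geometric-series closed form (objective: faster).

-- ===== PORT A =====
-- 10**j is exact as 10 ^ j.toNat here: every j produced by range(0, i) satisfies 0 ≤ j
def get_count_sum (num : Int) : Int :=
  (PySem.List.pyRange 1 (num + 1) 1).foldl
    (fun sum i =>
      sum + (PySem.List.pyRange 0 i 1).foldl (fun n j => n + 3 * 10 ^ j.toNat) 0) 0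

-- ===== PORT B =====
def get_count_sum_alt (num : Int) : Int :=
  let n : Int := if num > 0 then num else 0
  PySem.Int.floordiv (PySem.Int.floordiv (10 ^ (n + 1).toNat - 10) 9 - n) 3

-- ===== PRECONDITION & SPEC =====
def Spec_get_count_sum (num : Int) (out : Int) : Prop := out = get_count_sum_alt num
instance (num : Int) (out : Int) : Decidable (Spec_get_count_sum num out) := by unfold Spec_get_count_sum; infer_instance

-- ===== CLAIM (what is proved, stated in full; the proofs are below) =====
def Claim_equal_get_count_sum : Prop := ∀ (num : Int), Dom_get_count_sum num → Spec_get_count_sum num (get_count_sum num)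

-- ===== LEMMAS AND PROOFS =====

-- inner loop value: 3 * Σ_{j<k} 10^j, i.e. 3 * inner = 10^k - 1
theorem inner_val (k : ℕ) :
    3 * (PySem.List.pyRange 0 (k : Int) 1).foldl (fun (n j : Int) => n + 3 * 10 ^ j.toNat) (0 : Int)
      = 10 ^ k - 1 := by
  induction k with
  | zero => simp [PySem.List.pyRange_one_eq_nil]
  | succ k ih =>
    rw [show ((k + 1 : ℕ) : Int) = (k : Int) + 1 by push_cast; ring,
        PySem.List.pyRange_one_succ_right (by positivity)]
    rw [List.foldl_append]
    simp only [List.foldl_cons, List.foldl_nil, Int.toNat_natCast]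
    rw [mul_add, ih, pow_succ]
    ring

-- outer loop: 27 * A(k) = 10^(k+1) - 10 - 9k
theorem outer_val (k : ℕ) :
    27 * get_count_sum (k : Int) = 10 ^ (k + 1) - 10 - 9 * k := by
  induction k with
  | zero => simp [get_count_sum, PySem.List.pyRange_one_eq_nil]
  | succ k ih =>
    unfold get_count_sum at ih ⊢
    rw [PySem.List.pyRange_one_succ_right (by omega : (1 : Int) ≤ ((k + 1 : ℕ) : Int))]
    rw [List.foldl_append]
    simp only [List.foldl_cons, List.foldl_nil]
    have hin := inner_val (k + 1)
    push_cast at ih hin ⊢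
    rw [pow_succ (10 : Int) (k + 1)]
    linarith [ih, hin]

theorem get_count_sum_eq_alt (num : Int) : get_count_sum num = get_count_sum_alt num := by
  by_cases hpos : num > 0
  · obtain ⟨k, hk⟩ := Int.eq_ofNat_of_zero_le (le_of_lt hpos)
    subst hk
    have h27 := outer_val k
    unfold get_count_sum_alt
    simp only [hpos, if_pos]
    have hnat : (((k : Int) + 1)).toNat = k + 1 := by omega
    rw [hnat]
    have hpow : (10 : Int) ^ (k + 1) - 10 = 27 * get_count_sum (k : Int) + 9 * k := by
      omega
    rw [hpow]
    have h9 : PySem.Int.floordiv (27 * get_count_sum (k:Int) + 9 * (k:Int)) 9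
        = 3 * get_count_sum (k:Int) + (k:Int) := by
      rw [PySem.Int.floordiv_eq_ediv_of_pos (by norm_num)]
      have : 27 * get_count_sum (k:Int) + 9 * (k:Int) = 9 * (3 * get_count_sum (k:Int) + (k:Int)) := by ring
      rw [this, Int.mul_ediv_cancel_left _ (by norm_num)]
    rw [h9]
    have h3 : (3 * get_count_sum (k:Int) + (k:Int)) - (k:Int) = 3 * get_count_sum (k:Int) := by ring
    rw [h3, PySem.Int.floordiv_eq_ediv_of_pos (by norm_num),
        Int.mul_ediv_cancel_left _ (by norm_num)]
  · -- num ≤ 0: A's range is empty, B picks n = 0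
    unfold get_count_sum get_count_sum_alt
    rw [PySem.List.pyRange_one_eq_nil (by omega)]
    simp only [hpos, List.foldl_nil]
    norm_num [PySem.Int.floordiv]

-- ===== VERDICT (by name: the statement is the Claim_ definition above) =====
theorem get_count_sum_spec : Claim_equal_get_count_sum := by
  intro num _
  unfold Spec_get_count_sum
  exact get_count_sum_eq_alt num
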